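-- pv_equiv track=rewrite | github.com/lionelptrick/CP125-Class-Repo | labs/lab05/exercise3/exercise3.py | find_bottleneck_index
-- ===== SOURCE A (Python) =====
-- def find_bottleneck_index(traceroute):
--     max_jump = 0
--     bottleneck_index = 0
--
--     for i in range(len(traceroute) - 1):
--         current_latency = traceroute[i][1]
--         next_latency = traceroute[i + 1][1]
--
--         jump = abs(next_latency - current_latency)
--
--         if jump > max_jump:
--             max_jump = jump
--             bottleneck_index = i
--
--     return bottleneck_index
--
--     """
--     Find the index of the hop where the largest latency jump begins.
--     """
--     pass
-- ===== SOURCE B (Python) =====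
-- def find_bottleneck_index(traceroute):
--     latencies = [lat for _, lat in traceroute]
--     n = len(latencies)
--     if n < 2:
--         return 0
--
--     def best(lo, hi):
--         # leftmost (index, jump) with maximal jump among jump indices lo..hi-1
--         if hi - lo == 1:
--             return lo, abs(latencies[lo + 1] - latencies[lo])
--         mid = (lo + hi) // 2
--         left = best(lo, mid)
--         right = best(mid, hi)
--         return left if left[1] >= right[1] else right
--
--     return best(0, n - 1)[0]
-- ===== Notes on version B (the rewrite author's own statement) =====
-- stated objective: alternative
-- what changed: A's fused left-to-right max-tracking loop is replaced by a divide-and-conquer argmax: recursively compute the best jump in each half of the index range and merge with a leftmost-preferring tie rule (>=).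
import Mathlib
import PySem

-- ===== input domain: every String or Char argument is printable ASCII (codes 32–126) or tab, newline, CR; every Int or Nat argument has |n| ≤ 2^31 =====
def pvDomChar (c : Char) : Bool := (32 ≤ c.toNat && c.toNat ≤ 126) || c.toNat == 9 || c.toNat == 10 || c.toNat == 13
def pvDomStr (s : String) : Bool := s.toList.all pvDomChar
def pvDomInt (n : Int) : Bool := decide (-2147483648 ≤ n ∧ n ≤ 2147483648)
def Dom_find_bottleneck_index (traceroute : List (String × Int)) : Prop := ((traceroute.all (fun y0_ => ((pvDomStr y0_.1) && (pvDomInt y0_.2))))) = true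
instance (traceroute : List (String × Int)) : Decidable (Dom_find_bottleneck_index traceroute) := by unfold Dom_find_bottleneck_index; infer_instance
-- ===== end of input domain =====

-- B replaces A's fused left-to-right max-tracking loop by a divide-and-conquer argmax
-- with a leftmost-preferring merge; same return value everywhere (alternative, no speed claim).

-- ===== PORT A =====
-- A's fused loop: for i in range(len-1), jump = abs(tr[i+1][1]-tr[i][1]); track (max_jump, bottleneck_index).
-- Indices i and i+1 are always in range, so the getD defaults are never used.
def find_bottleneck_index (traceroute : List (String × Int)) : Int :=
  ((List.range (traceroute.length - 1)).foldl
    (fun (st : Int × Int) i =>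
      let current_latency := (traceroute.getD i ("", 0)).2
      let next_latency := (traceroute.getD (i + 1) ("", 0)).2
      let jump := |next_latency - current_latency|
      if jump > st.1 then (jump, (i : Int)) else st)
    (0, 0)).2

-- ===== PORT B =====
-- B's recursive helper 'best(lo, hi)': leftmost (index, jump) with maximal jump among
-- jump indices lo..hi-1.  Python's base test is 'hi - lo == 1'; since best is only ever
-- called with lo < hi, the '≤ 1' guard here is the same test and only totalizes the
-- Lean recursion (lat.getD defaults are never used on the call sites reached).
def pvBest (latencies : List Int) (lo hi : Nat) : Nat × Int :=
  if hi - lo ≤ 1 then (lo, |latencies.getD (lo + 1) 0 - latencies.getD lo 0|)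
  else
    let mid := (lo + hi) / 2
    let left := pvBest latencies lo mid
    let right := pvBest latencies mid hi
    if left.2 ≥ right.2 then left else right
termination_by hi - lo
decreasing_by all_goals omega

def find_bottleneck_index_alt (traceroute : List (String × Int)) : Int :=
  let latencies := traceroute.map Prod.snd
  let n := latencies.length
  if n < 2 then 0
  else ((pvBest latencies 0 (n - 1)).1 : Int)

-- ===== PRECONDITION & SPEC =====
def Spec_find_bottleneck_index (traceroute : List (String × Int)) (out : Int) : Prop := out = find_bottleneck_index_alt traceroute
instance (traceroute : List (String × Int)) (out : Int) : Decidable (Spec_find_bottleneck_index traceroute out) := by unfold Spec_find_bottleneck_index; infer_instance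

-- ===== CLAIM =====
def Claim_equal_find_bottleneck_index : Prop := ∀ (traceroute : List (String × Int)), Dom_find_bottleneck_index traceroute → Spec_find_bottleneck_index traceroute (find_bottleneck_index traceroute)

-- ===== LEMMAS AND PROOFS =====

-- A's fused fold equals the plain Nat argmax fold (first strict improvement), and its
-- running max is the value at the current best (0 when the range is empty).
theorem argmax_inv (f : Nat → Int) (hf : ∀ i, 0 ≤ f i) (n : Nat) :
    ((List.range n).foldl
      (fun (st : Int × Int) i => if f i > st.1 then (f i, (i : Int)) else st) (0, 0)).2
      = (((List.range n).foldl
          (fun (best : Nat) i => if f i > f best then i else best) 0 : Nat) : Int)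
    ∧ ((List.range n).foldl
      (fun (st : Int × Int) i => if f i > st.1 then (f i, (i : Int)) else st) (0, 0)).1
      = (if n = 0 then 0 else f ((List.range n).foldl
          (fun (best : Nat) i => if f i > f best then i else best) 0)) := by
  induction n with
  | zero => simp
  | succ n ih =>
    obtain ⟨ih2, ih1⟩ := ih
    rw [List.range_succ, List.foldl_append, List.foldl_append]
    by_cases hn : n = 0
    · subst hn
      simp only [List.range_zero, List.foldl_nil, lt_irrefl, if_false, List.foldl_cons]
      constructor
      · split <;> simp
      · have := hf 0
        split
        · simp
        · simp; omega
    · simp only [List.foldl_cons, List.foldl_nil]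
      rw [ih1, if_neg hn]
      by_cases hc : f n > f ((List.range n).foldl
          (fun (best : Nat) i => if f i > f best then i else best) 0)
      · rw [if_pos hc, if_pos hc]; simp
      · rw [if_neg hc, if_neg hc]
        refine ⟨ih2, ?_⟩
        rw [ih1, if_neg hn]; simp

-- "leftmost argmax of f on [lo, hi)" as a predicate on an index.
def LeftArgmax (f : Nat → Int) (lo hi b : Nat) : Prop :=
  lo ≤ b ∧ b < hi ∧ (∀ k, lo ≤ k → k < hi → f k ≤ f b) ∧ (∀ k, lo ≤ k → k < b → f k < f b)

theorem leftArgmax_unique (f : Nat → Int) (lo hi a b : Nat)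
    (ha : LeftArgmax f lo hi a) (hb : LeftArgmax f lo hi b) : a = b := by
  obtain ⟨ha1, ha2, ha3, ha4⟩ := ha
  obtain ⟨hb1, hb2, hb3, hb4⟩ := hb
  rcases Nat.lt_trichotomy a b with h | h | h
  · exact absurd (hb4 a ha1 h) (not_lt.mpr (ha3 b hb1 hb2))
  · exact h
  · exact absurd (ha4 b hb1 h) (not_lt.mpr (hb3 a ha1 ha2))

-- The Nat argmax fold over range n (n > 0) computes the leftmost argmax on [0, n).
theorem linFold_leftArgmax (f : Nat → Int) (n : Nat) (hn : 0 < n) :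
    LeftArgmax f 0 n ((List.range n).foldl
      (fun (best : Nat) i => if f i > f best then i else best) 0) := by
  induction n with
  | zero => omega
  | succ n ih =>
    rw [List.range_succ, List.foldl_append, List.foldl_cons, List.foldl_nil]
    by_cases hn0 : n = 0
    · subst hn0
      simp only [List.range_zero, List.foldl_nil, lt_irrefl, gt_iff_lt, if_false]
      refine ⟨le_refl _, Nat.lt_succ_self _, ?_, ?_⟩
      · intro k hk1 hk2
        have hk0 : k = 0 := by omega
        simp [hk0]
      · intro k hk1 hk2; omega
    · obtain ⟨h1, h2, h3, h4⟩ := ih (Nat.pos_of_ne_zero hn0)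
      set b := (List.range n).foldl (fun (best : Nat) i => if f i > f best then i else best) 0 with hb
      by_cases hc : f n > f b
      · rw [if_pos hc]
        refine ⟨Nat.zero_le _, Nat.lt_succ_self _, ?_, ?_⟩
        · intro k _ hk
          rcases Nat.lt_succ_iff_lt_or_eq.mp hk with h | h
          · exact le_of_lt (lt_of_le_of_lt (h3 k (Nat.zero_le _) h) hc)
          · simp [h]
        · intro k _ hk
          exact lt_of_le_of_lt (h3 k (Nat.zero_le _) hk) hc
      · rw [if_neg hc]
        refine ⟨Nat.zero_le _, Nat.lt_succ_of_lt h2, ?_, h4⟩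
        intro k _ hk
        rcases Nat.lt_succ_iff_lt_or_eq.mp hk with h | h
        · exact h3 k (Nat.zero_le _) h
        · subst h; exact not_lt.mp hc

-- pvBest computes the leftmost argmax on [lo, hi) (for lo < hi), with its value field.
theorem pvBest_spec (lat : List Int) :
    ∀ d lo hi, hi - lo = d → lo < hi →
      LeftArgmax (fun i => |lat.getD (i + 1) 0 - lat.getD i 0|) lo hi (pvBest lat lo hi).1
      ∧ (pvBest lat lo hi).2 = |lat.getD ((pvBest lat lo hi).1 + 1) 0 - lat.getD (pvBest lat lo hi).1 0| := by
  intro d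
  induction d using Nat.strong_induction_on with
  | _ d ih =>
    intro lo hi hd hlt
    rw [pvBest]
    by_cases hbase : hi - lo ≤ 1
    · have hhi : hi = lo + 1 := by omega
      rw [if_pos hbase]
      refine ⟨⟨le_refl _, hlt, ?_, ?_⟩, rfl⟩
      · intro k hk1 hk2; have : k = lo := by omega
        simp [this]
      · intro k hk1 hk2; omega
    · rw [if_neg hbase]
      have hmid1 : lo < (lo + hi) / 2 := by omega
      have hmid2 : (lo + hi) / 2 < hi := by omega
      set mid := (lo + hi) / 2 with hm
      obtain ⟨⟨l1, l2, l3, l4⟩, lv⟩ :=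
        ih (mid - lo) (by omega) lo mid rfl hmid1
      obtain ⟨⟨r1, r2, r3, r4⟩, rv⟩ :=
        ih (hi - mid) (by omega) mid hi rfl hmid2
      set L := pvBest lat lo mid with hL
      set R := pvBest lat mid hi with hR
      by_cases hc : L.2 ≥ R.2
      · rw [if_pos hc]
        refine ⟨⟨l1, lt_trans l2 hmid2, ?_, ?_⟩, lv⟩
        · intro k hk1 hk2
          rcases Nat.lt_or_ge k mid with h | h
          · exact l3 k hk1 h
          · calc |lat.getD (k + 1) 0 - lat.getD k 0| ≤ R.2 := by rw [rv]; exact r3 k h hk2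
              _ ≤ L.2 := hc
              _ = _ := lv
        · intro k hk1 hk2
          exact l4 k hk1 hk2
      · rw [if_neg hc]
        have hc' : L.2 < R.2 := lt_of_not_ge hc
        refine ⟨⟨le_trans (le_of_lt hmid1) r1, r2, ?_, ?_⟩, rv⟩
        · intro k hk1 hk2
          rcases Nat.lt_or_ge k mid with h | h
          · calc |lat.getD (k + 1) 0 - lat.getD k 0| ≤ L.2 := by rw [lv]; exact l3 k hk1 h
              _ ≤ R.2 := le_of_lt hc'
              _ = _ := rv
          · exact r3 k h hk2
        · intro k hk1 hk2
          rcases Nat.lt_or_ge k mid with h | h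
          · calc |lat.getD (k + 1) 0 - lat.getD k 0| ≤ L.2 := by rw [lv]; exact l3 k hk1 h
              _ < R.2 := hc'
              _ = _ := rv
          · exact r4 k h hk2

-- the two jump functions agree on indices below len-1
theorem jump_agree (tr : List (String × Int)) (k : Nat) (hk : k < tr.length - 1) :
    |(tr.map Prod.snd).getD (k + 1) 0 - (tr.map Prod.snd).getD k 0|
      = |(tr.getD (k + 1) ("", 0)).2 - (tr.getD k ("", 0)).2| := by
  have h1 : k < tr.length := by omega
  have h2 : k + 1 < tr.length := by omega
  simp [List.getD_eq_getElem?_getD, List.getElem?_map,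
    List.getElem?_eq_getElem h1, List.getElem?_eq_getElem h2]

theorem leftArgmax_congr (f g : Nat → Int) (n b : Nat)
    (h : ∀ k, k < n → f k = g k) (hb : LeftArgmax f 0 n b) : LeftArgmax g 0 n b := by
  obtain ⟨h1, h2, h3, h4⟩ := hb
  refine ⟨h1, h2, ?_, ?_⟩
  · intro k hk1 hk2; rw [← h k hk2, ← h b h2]; exact h3 k hk1 hk2
  · intro k hk1 hk2; rw [← h k (lt_trans hk2 h2), ← h b h2]; exact h4 k hk1 hk2

-- ===== VERDICT =====
theorem find_bottleneck_index_spec : Claim_equal_find_bottleneck_index := by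
  intro tr _
  unfold Spec_find_bottleneck_index find_bottleneck_index find_bottleneck_index_alt
  simp only [List.length_map]
  by_cases h : tr.length < 2
  · have h0 : tr.length - 1 = 0 := by omega
    simp [h0, h]
  · rw [if_neg h]
    have hn1 : 0 < tr.length - 1 := by omega
    set n := tr.length - 1 with hn
    set f : Nat → Int := fun i => |(tr.getD (i + 1) ("", 0)).2 - (tr.getD i ("", 0)).2| with hf
    set g : Nat → Int := fun i => |(tr.map Prod.snd).getD (i + 1) 0 - (tr.map Prod.snd).getD i 0| with hg
    have hagree : ∀ k, k < n → g k = f k := by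
      intro k hk; exact jump_agree tr k hk
    have hA := (argmax_inv f (fun i => abs_nonneg _) n).1
    have hlin : LeftArgmax f 0 n ((List.range n).foldl
        (fun (best : Nat) i => if f i > f best then i else best) 0) :=
      linFold_leftArgmax f n hn1
    have hB : LeftArgmax f 0 n (pvBest (tr.map Prod.snd) 0 n).1 :=
      leftArgmax_congr g f n _ hagree (pvBest_spec (tr.map Prod.snd) (n - 0) 0 n rfl hn1).1
    have heq : ((List.range n).foldl
        (fun (best : Nat) i => if f i > f best then i else best) 0)
        = (pvBest (tr.map Prod.snd) 0 n).1 :=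
      leftArgmax_unique f 0 n _ _ hlin hB
    rw [hA, heq]
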